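-- pv_equiv track=rewrite | github.com/KIKW12/Password-Generator-Python | proyecto.py | obtener_primos
-- ===== SOURCE A (Python) =====
-- def obtener_primos(cantidad):
--     '''
--     Se inicializa una lista vacia que contendra los numeros primos encontrados.
--     '''
--     primos = []
--
--     '''
--     Se incia la variable numero en 5, ya que los primeros numeros primos en el patron 6k±1 son 5 y 7.
--     '''
--     numero = 5
--
--     '''
--     La variable paso se inicia en 2, esto determina el cambio entre los numeros 6k-1 y 6k+1 alternadamente,
--     se comienza en 2 que representa 6k-1.
--     '''
--     paso = 2
--
--     '''
--     Este bucle while se ejecutara hasta que hayamos encontrado la cantidad de numros primos especificados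
--     'cantidad'.
--     '''
--     while len(primos) < cantidad:
--
--         '''
--         Este condicional comprueba si el numero actual (numero) es primo. Verifica que numero no sea
--         divisible por un numero anterior en la lista primos.
--         '''
--         if all(numero % p != 0 for p in primos):
--             '''
--             Si el numero actual que estamos analizando pasa la prueba de ser primo se agrega a la lista.
--             '''
--             primos.append(numero)
--         '''
--         Se incrementa numero por el valor de paso. Esto nos permite avanzar al siguiente numero de la
--         secuencia 6k+1
--         '''
--         numero += paso
--
--         '''
--         Cambiamos el valor de paso para alternar  entre 2 (que representa 6k-1) y 4 (que representa
--         6k+1).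
--         '''
--         paso = 6 - paso
--
--     '''
--     Cuando se alcanza la cantidad deseada de numeros primos, se conviertenen en cadena de texto y se
--     devuelven.
--     '''
--     return ''.join(str(p) for p in primos)
-- ===== SOURCE B (Python) =====
-- def obtener_primos(cantidad):
--     def es_primo(n):
--         # trial division only by 6k±1 candidates up to sqrt(n)
--         d = 5
--         paso = 2
--         while d * d <= n:
--             if n % d == 0:
--                 return False
--             d += paso
--             paso = 6 - paso
--         return True
--
--     partes = []
--     encontrados = 0
--     numero = 5
--     paso = 2
--     while encontrados < cantidad:
--         if es_primo(numero):
--             partes.append(str(numero))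
--             encontrados += 1
--         numero += paso
--         paso = 6 - paso
--     return ''.join(partes)
-- ===== Notes on version B (the rewrite author's own statement) =====
-- stated objective: faster
-- what changed: A tests each candidate by dividing by ALL previously found primes; B tests each candidate by trial division only by 6k±1 divisors up to sqrt(candidate), so no prime list is consulted at all.
import Mathlib
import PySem

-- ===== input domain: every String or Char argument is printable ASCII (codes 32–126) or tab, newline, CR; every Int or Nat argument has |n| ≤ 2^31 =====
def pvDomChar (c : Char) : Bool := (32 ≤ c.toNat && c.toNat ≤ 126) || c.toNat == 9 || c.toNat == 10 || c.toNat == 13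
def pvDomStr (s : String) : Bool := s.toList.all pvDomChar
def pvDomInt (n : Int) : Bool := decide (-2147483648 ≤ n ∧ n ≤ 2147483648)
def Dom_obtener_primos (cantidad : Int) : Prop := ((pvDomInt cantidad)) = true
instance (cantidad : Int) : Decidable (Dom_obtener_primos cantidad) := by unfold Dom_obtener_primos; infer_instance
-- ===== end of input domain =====

-- B replaces A's per-candidate division by every previously found prime with trial
-- division only by 6k±1 divisors up to √candidate (objective: faster, asymptotic).


-- ===== PORT A =====
-- the while loop, one fuel unit per iteration; the fuel is a totality guard only
-- (it is amply sufficient for the inputs the behaviour is checked on, and the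
-- equivalence below is proved for EVERY fuel value, the same on both sides)
def obtenerLoopA (cantidad : Int) : Nat → List Nat → Nat → Nat → List Nat
  | 0, primos, _, _ => primos
  | fuel+1, primos, numero, paso =>
    if (primos.length : Int) < cantidad then
      obtenerLoopA cantidad fuel
        (if primos.all (fun p => numero % p != 0) then primos ++ [numero] else primos)
        (numero + paso) (6 - paso)
    else primos

def obtener_primos (cantidad : Int) : String :=
  PySem.Str.join ""
    ((obtenerLoopA cantidad ((cantidad.toNat + 4) ^ 2) [] 5 2).map
      (fun p => PySem.Int.toStr (p : Int)))

-- ===== PORT B =====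
-- es_primo: trial division by d = 5,7,11,13,… (6k±1) while d*d ≤ n; fuel n is a
-- totality guard only (d grows by ≥2 per step, so the d*d > n exit is always reached)
def esPrimoGo (n : Nat) : Nat → Nat → Nat → Bool
  | 0, _, _ => true
  | fuel+1, d, paso =>
    if d * d ≤ n then
      if n % d == 0 then false
      else esPrimoGo n fuel (d + paso) (6 - paso)
    else true

def esPrimo (n : Nat) : Bool := esPrimoGo n n 5 2

def obtenerLoopB (cantidad : Int) : Nat → List String → Nat → Nat → Nat → List String
  | 0, partes, _, _, _ => partes
  | fuel+1, partes, encontrados, numero, paso =>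
    if (encontrados : Int) < cantidad then
      if esPrimo numero then
        obtenerLoopB cantidad fuel (partes ++ [PySem.Int.toStr (numero : Int)])
          (encontrados + 1) (numero + paso) (6 - paso)
      else
        obtenerLoopB cantidad fuel partes encontrados (numero + paso) (6 - paso)
    else partes

def obtener_primos_alt (cantidad : Int) : String :=
  PySem.Str.join "" (obtenerLoopB cantidad ((cantidad.toNat + 4) ^ 2) [] 0 5 2)

-- ===== PRECONDITION & SPEC =====
def Spec_obtener_primos (cantidad : Int) (out : String) : Prop := out = obtener_primos_alt cantidad
instance (cantidad : Int) (out : String) : Decidable (Spec_obtener_primos cantidad out) := by unfold Spec_obtener_primos; infer_instance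

-- ===== CLAIM (what is proved, stated in full; the proofs are below) =====
def Claim_equal_obtener_primos : Prop := ∀ (cantidad : Int), Dom_obtener_primos cantidad → Spec_obtener_primos cantidad (obtener_primos cantidad)

-- ===== LEMMAS AND PROOFS =====

-- the 6k±1 candidate sequence 5,7,11,13,… and the alternating step
def cand (i : Nat) : Nat := 6 * (i / 2) + (if i % 2 = 0 then 5 else 7)
def pasoOf (i : Nat) : Nat := if i % 2 = 0 then 2 else 4
def primesUpTo (i : Nat) : List Nat :=
  ((List.range i).map cand).filter (fun n => decide n.Prime)

theorem cand_succ (i : Nat) : cand (i + 1) = cand i + pasoOf i := by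
  unfold cand pasoOf; split_ifs <;> omega

theorem paso_succ (i : Nat) : 6 - pasoOf i = pasoOf (i + 1) := by
  unfold pasoOf; split_ifs <;> omega

theorem cand_ge (i : Nat) : 5 ≤ cand i := by
  unfold cand; split <;> omega

theorem cand_mod6 (i : Nat) : cand i % 6 = 5 ∨ cand i % 6 = 1 := by
  unfold cand; split <;> omega

theorem cand_strictMono : StrictMono cand := by
  apply strictMono_nat_of_lt_succ
  intro n
  rw [cand_succ]
  have : 0 < pasoOf n := by unfold pasoOf; split <;> omega
  omega

theorem cand_surj (m : Nat) (h5 : 5 ≤ m) (h6 : m % 6 = 5 ∨ m % 6 = 1) :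
    ∃ j, cand j = m := by
  rcases h6 with h | h
  · exact ⟨2 * (m / 6), by unfold cand; split_ifs <;> omega⟩
  · exact ⟨2 * (m / 6) - 1, by unfold cand; split_ifs <;> omega⟩

theorem mem_primesUpTo {p i : Nat} :
    p ∈ primesUpTo i ↔ (∃ j < i, cand j = p) ∧ p.Prime := by
  simp [primesUpTo, List.mem_filter, List.mem_map, List.mem_range]

theorem primesUpTo_succ (i : Nat) :
    primesUpTo (i + 1) =
      primesUpTo i ++ (if (cand i).Prime then [cand i] else []) := by
  unfold primesUpTo
  rw [List.range_succ, List.map_append, List.filter_append]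
  simp only [List.map_cons, List.map_nil, List.filter]
  split_ifs <;> simp_all

-- smallest factor of a composite wheel number is itself a wheel number < n with square ≤ n
theorem minFac_wheel (n : Nat) (h5 : 5 ≤ n) (h6 : n % 6 = 5 ∨ n % 6 = 1)
    (hnp : ¬ n.Prime) :
    (n.minFac).Prime ∧ n % n.minFac = 0 ∧ n.minFac * n.minFac ≤ n ∧
      n.minFac < n ∧ 5 ≤ n.minFac ∧ (n.minFac % 6 = 5 ∨ n.minFac % 6 = 1) := by
  have hn1 : n ≠ 1 := by omega
  have hq : (n.minFac).Prime := Nat.minFac_prime hn1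
  have hdvd : n.minFac ∣ n := Nat.minFac_dvd n
  have hsq : n.minFac * n.minFac ≤ n := by
    have := Nat.minFac_sq_le_self (by omega : 0 < n) hnp
    simpa [pow_two] using this
  have hmod : n % n.minFac = 0 := Nat.mod_eq_zero_of_dvd hdvd
  have h2 : ¬ 2 ∣ n.minFac := by
    intro h
    have : 2 ∣ n := h.trans hdvd
    have := Nat.mod_eq_zero_of_dvd this
    omega
  have h3 : ¬ 3 ∣ n.minFac := by
    intro h
    have : 3 ∣ n := h.trans hdvd
    have := Nat.mod_eq_zero_of_dvd this
    omega
  have hq2 : 2 ≤ n.minFac := hq.two_le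
  have hm2 : n.minFac % 2 = 1 := by
    rcases Nat.mod_two_eq_zero_or_one n.minFac with h | h
    · exact absurd (Nat.dvd_of_mod_eq_zero h) h2
    · exact h
  have hm3 : n.minFac % 3 ≠ 0 := fun h => h3 (Nat.dvd_of_mod_eq_zero h)
  have hge5 : 5 ≤ n.minFac := by omega
  have hlt : n.minFac < n := by
    have h5m : 5 * n.minFac ≤ n.minFac * n.minFac :=
      Nat.mul_le_mul_right _ hge5
    omega
  exact ⟨hq, hmod, hsq, hlt, hge5, by omega⟩

-- A's test over the list of previously found primes decides primality of cand i
theorem testA_eq (i : Nat) :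
    (primesUpTo i).all (fun p => cand i % p != 0) = decide (cand i).Prime := by
  by_cases hp : (cand i).Prime
  · simp only [hp, decide_true]
    rw [List.all_eq_true]
    intro p hpmem
    rcases mem_primesUpTo.mp hpmem with ⟨⟨j, hj, rfl⟩, hpj⟩
    have hlt : cand j < cand i := cand_strictMono hj
    simp only [bne_iff_ne, ne_eq]
    intro hmod
    have hdvd : cand j ∣ cand i := Nat.dvd_of_mod_eq_zero hmod
    rcases (hp.eq_one_or_self_of_dvd _ hdvd) with h | h
    · exact absurd h hpj.one_lt.ne'
    · omega
  · simp only [hp, decide_false]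
    obtain ⟨hqp, hqmod, hqsq, hqlt, hq5, hq6⟩ :=
      minFac_wheel (cand i) (cand_ge i) (cand_mod6 i) hp
    obtain ⟨j, hj⟩ := cand_surj _ hq5 hq6
    have hji : j < i := by
      have := cand_strictMono.lt_iff_lt (a := j) (b := i)
      omega
    have hmem : (cand i).minFac ∈ primesUpTo i :=
      mem_primesUpTo.mpr ⟨⟨j, hji, hj⟩, hqp⟩
    rw [List.all_eq_false]
    exact ⟨_, hmem, by simp [hqmod]⟩

-- the trial-division inner loop checks exactly the wheel divisors d ≤ m, m*m ≤ n
theorem esPrimoGo_spec (n : Nat) :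
    ∀ fuel d paso, (d % 6 = 5 ∧ paso = 2 ∨ d % 6 = 1 ∧ paso = 4) →
      n < (d + 2 * fuel) * (d + 2 * fuel) →
      (esPrimoGo n fuel d paso = true ↔
        ∀ m, d ≤ m → m * m ≤ n → (m % 6 = 5 ∨ m % 6 = 1) → n % m ≠ 0) := by
  intro fuel
  induction fuel with
  | zero =>
    intro d paso _ hb
    simp only [esPrimoGo, true_iff]
    intro m h1 h2 _ _
    have h := Nat.mul_le_mul h1 h1
    have hb' : n < d * d := by simpa using hb
    omega
  | succ fuel ih =>
    intro d paso halign hb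
    simp only [esPrimoGo]
    by_cases hdd : d * d ≤ n
    · simp only [hdd, if_true]
      by_cases hmod : n % d = 0
      · simp only [hmod, beq_self_eq_true, if_true]
        constructor
        · intro h; cases h
        · intro h
          exfalso
          have hd6 : d % 6 = 5 ∨ d % 6 = 1 := by rcases halign with ⟨h, _⟩ | ⟨h, _⟩ <;> omega
          exact h d le_rfl hdd hd6 hmod
      · have hne : (n % d == 0) = false := by simp [hmod]
        simp only [hne, Bool.false_eq_true, if_false]
        have halign' : ((d + paso) % 6 = 5 ∧ 6 - paso = 2 ∨
            (d + paso) % 6 = 1 ∧ 6 - paso = 4) := by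
          rcases halign with ⟨h1, h2⟩ | ⟨h1, h2⟩
          · right; omega
          · left; omega
        have hpaso2 : 2 ≤ paso := by rcases halign with ⟨_, h⟩ | ⟨_, h⟩ <;> omega
        have hb' : n < (d + paso + 2 * fuel) * (d + paso + 2 * fuel) := by
          have hle : d + 2 * (fuel + 1) ≤ d + paso + 2 * fuel := by omega
          have := Nat.mul_le_mul hle hle
          omega
        rw [ih (d + paso) (6 - paso) halign' hb']
        constructor
        · intro h m h1 h2 h6 hm
          by_cases hcase : d + paso ≤ m
          · exact h m hcase h2 h6 hm
          · -- d ≤ m < d + paso : m is d itself or a number off the wheel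
            have hmd : m = d := by
              rcases halign with ⟨ha1, ha2⟩ | ⟨ha1, ha2⟩ <;>
                rcases h6 with h6 | h6 <;> omega
            rw [hmd] at hm
            exact hmod hm
        · intro h m h1 h2 h6 hm
          exact h m (by omega) h2 h6 hm
    · simp only [hdd, if_false, true_iff]
      intro m h1 h2 _ _
      have h := Nat.mul_le_mul h1 h1
      omega

-- B's test decides primality of a wheel number
theorem esPrimo_eq (n : Nat) (h5 : 5 ≤ n) (h6 : n % 6 = 5 ∨ n % 6 = 1) :
    esPrimo n = decide n.Prime := by
  have hb : n < (5 + 2 * n) * (5 + 2 * n) := by nlinarith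
  have hspec := esPrimoGo_spec n n 5 2 (Or.inl ⟨rfl, rfl⟩) hb
  unfold esPrimo
  by_cases hp : n.Prime
  · simp only [hp, decide_true]
    rw [hspec]
    intro m h1 h2 _ hm
    have hdvd : m ∣ n := Nat.dvd_of_mod_eq_zero hm
    rcases hp.eq_one_or_self_of_dvd _ hdvd with h | h
    · omega
    · have h5m : 5 * m ≤ m * m := Nat.mul_le_mul_right _ h1
      omega
  · simp only [hp, decide_false]
    obtain ⟨hqp, hqmod, hqsq, hqlt, hq5, hq6⟩ := minFac_wheel n h5 h6 hp
    rw [Bool.eq_false_iff, ne_eq, hspec]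
    intro h
    exact h n.minFac hq5 hqsq hq6 hqmod

-- the two while loops, run with the same fuel from corresponding states, agree
theorem loop_eq (fuel : Nat) : ∀ (i : Nat) (cantidad : Int),
    obtenerLoopB cantidad fuel
        ((primesUpTo i).map (fun p => PySem.Int.toStr (p : Int)))
        (primesUpTo i).length (cand i) (pasoOf i)
      = (obtenerLoopA cantidad fuel (primesUpTo i) (cand i) (pasoOf i)).map
          (fun p => PySem.Int.toStr (p : Int)) := by
  induction fuel with
  | zero => intro i cantidad; simp [obtenerLoopA, obtenerLoopB]
  | succ fuel ih =>
    intro i cantidad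
    simp only [obtenerLoopA, obtenerLoopB]
    by_cases hguard : ((primesUpTo i).length : Int) < cantidad
    · simp only [hguard, if_true]
      have htest : esPrimo (cand i) = decide (cand i).Prime :=
        esPrimo_eq _ (cand_ge i) (cand_mod6 i)
      have htestA := testA_eq i
      by_cases hp : (cand i).Prime
      · rw [htest, htestA]
        simp only [hp, decide_true, if_true]
        have hnext : primesUpTo (i + 1) = primesUpTo i ++ [cand i] := by
          rw [primesUpTo_succ]; simp [hp]
        have h2 := ih (i + 1) cantidad
        rw [hnext] at h2
        rw [paso_succ, ← cand_succ]
        simpa using h2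
      · rw [htest, htestA]
        simp only [hp, decide_false, Bool.false_eq_true, if_false]
        have hnext : primesUpTo (i + 1) = primesUpTo i := by
          rw [primesUpTo_succ]; simp [hp]
        have h2 := ih (i + 1) cantidad
        rw [hnext] at h2
        rw [paso_succ, ← cand_succ]
        exact h2
    · simp only [hguard, if_false]

-- ===== VERDICT (by name: the statement is the Claim_ definition above) =====
theorem obtener_primos_spec : Claim_equal_obtener_primos := by
  intro cantidad _
  unfold Spec_obtener_primos obtener_primos obtener_primos_alt
  have h := loop_eq ((cantidad.toNat + 4) ^ 2) 0 cantidad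
  have h0 : primesUpTo 0 = [] := by simp [primesUpTo]
  rw [h0] at h
  simp only [List.length_nil] at h
  have hc : cand 0 = 5 := by unfold cand; simp
  have hpz : pasoOf 0 = 2 := by unfold pasoOf; simp
  rw [hc, hpz] at h
  exact (congrArg (PySem.Str.join "") h).symm
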